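-- pv_equiv track=rewrite | github.com/zariuq/ai-agents | megalodon/ramsey36/gen_adj17_triangle_free.py | gen_inner_z_cases
-- ===== SOURCE A (Python) =====
-- EDGES = {
--     0: [9, 14, 15, 16],
--     1: [7, 11, 13, 16],
--     2: [8, 10, 12, 15],
--     3: [6, 8, 13, 15, 16],
--     4: [5, 7, 12, 14, 16],
--     5: [4, 9, 10, 11, 13],
--     6: [3, 10, 11, 12, 14],
--     7: [1, 4, 9, 10, 15],
--     8: [2, 3, 9, 11, 14],
--     9: [0, 5, 7, 8, 12],
--     10: [2, 5, 6, 7, 16],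
--     11: [1, 5, 6, 8, 15],
--     12: [2, 4, 6, 9, 13],
--     13: [1, 3, 5, 12, 14],
--     14: [0, 4, 6, 8, 13],
--     15: [0, 2, 3, 7, 11],
--     16: [0, 1, 3, 4, 10],
-- }
--
-- def is_edge(i, j):
--     """Return True iff (i,j) is an edge."""
--     return j in EDGES[i]
--
-- def generate_case_proof(x, y, z):
--     """
--     Generate proof for a single (x,y,z) case.
--
--     We're proving: Adj17 x y -> Adj17 y z -> Adj17 x z -> False
--     """
--     lines = []
--
--     # Check which "edges" exist
--     xy_edge = is_edge(x, y)
--     yz_edge = is_edge(y, z)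
--     xz_edge = is_edge(x, z)
--
--     if x == y:
--         # If x = y, then Adj17 x y is the same as Adj17 x x which should be false
--         # (no self-loops). Use the non-edge proof.
--         lines.append(f"    exact Adj17_not_{x}_{y} H1.")
--     elif y == z:
--         lines.append(f"    exact Adj17_not_{y}_{z} H2.")
--     elif x == z:
--         lines.append(f"    exact Adj17_not_{x}_{z} H3.")
--     elif not xy_edge:
--         # H1: Adj17 x y contradicts Adj17_not_x_y
--         lines.append(f"    exact Adj17_not_{x}_{y} H1.")
--     elif not yz_edge:
--         # H2: Adj17 y z contradicts Adj17_not_y_z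
--         lines.append(f"    exact Adj17_not_{y}_{z} H2.")
--     elif not xz_edge:
--         # H3: Adj17 x z contradicts Adj17_not_x_z
--         lines.append(f"    exact Adj17_not_{x}_{z} H3.")
--     else:
--         # All three are edges - this is a triangle!
--         # This should never happen in the Graver-Yackel graph
--         raise ValueError(f"Triangle detected: {x}-{y}-{z}")
--
--     return lines
--
-- def gen_inner_z_cases(x, y):
--     """Generate the proof for all z cases given fixed x, y."""
--     lines = []
--
--     # For z :e 17, we need cases_17 or explicit z = 0, z = 1, ..., z = 16
--     # Since cases_17 isn't in preamble, we'll use explicit bullets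
--
--     for z in range(17):
--         if z == 0:
--             # First case doesn't need bullet for innermost
--             pass
--         lines.append(f"  + assume Hz: z = {z}.")
--         lines.append(f"    rewrite Hz in H1 H2 H3.")
--         lines.extend(generate_case_proof(x, y, z))
--
--     return lines
-- ===== SOURCE B (Python) =====
-- EDGES = {
--     0: [9, 14, 15, 16],
--     1: [7, 11, 13, 16],
--     2: [8, 10, 12, 15],
--     3: [6, 8, 13, 15, 16],
--     4: [5, 7, 12, 14, 16],
--     5: [4, 9, 10, 11, 13],
--     6: [3, 10, 11, 12, 14],
--     7: [1, 4, 9, 10, 15],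
--     8: [2, 3, 9, 11, 14],
--     9: [0, 5, 7, 8, 12],
--     10: [2, 5, 6, 7, 16],
--     11: [1, 5, 6, 8, 15],
--     12: [2, 4, 6, 9, 13],
--     13: [1, 3, 5, 12, 14],
--     14: [0, 4, 6, 8, 13],
--     15: [0, 2, 3, 7, 11],
--     16: [0, 1, 3, 4, 10],
-- }
--
-- def gen_inner_z_cases(x, y):
--     """Generate the proof for all z cases given fixed x, y.
--
--     Staged set-arithmetic version: instead of deciding per z with an edge-test
--     cascade, classify all 17 z-values in advance into three label sets h1/h2/h3
--     (which hypothesis refutes the triangle), then emit the lines in one pass.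
--     The x-y test is hoisted out of the loop since it does not depend on z.
--     """
--     Z = set(range(17))
--     if x == y:
--         h1, h2, h3 = Z, set(), set()
--     else:
--         nx, ny = set(EDGES[x]), set(EDGES[y])
--         rest = Z - {x, y}
--         if y not in nx:
--             # Adj17 x y is already refutable: every z (except the degenerate
--             # z=y / z=x cases, which A dispatches to H2/H3) uses H1.
--             h1, h2, h3 = rest, {y}, {x}
--         else:
--             h1 = set()
--             h2 = {y} | (rest - ny)
--             h3 = {x} | ((rest & ny) - nx)
--             tri = rest & ny & nx
--             if tri:
--                 z = min(tri)
--                 raise ValueError(f"Triangle detected: {x}-{y}-{z}")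
--     lines = []
--     for z in range(17):
--         lines.append(f"  + assume Hz: z = {z}.")
--         lines.append(f"    rewrite Hz in H1 H2 H3.")
--         if z in h1:
--             lines.append(f"    exact Adj17_not_{x}_{y} H1.")
--         elif z in h2:
--             lines.append(f"    exact Adj17_not_{y}_{z} H2.")
--         else:
--             lines.append(f"    exact Adj17_not_{x}_{z} H3.")
--     return lines
-- ===== Notes on version B (the rewrite author's own statement) =====
-- stated objective: alternative
-- what changed: Instead of running A's six-way per-z edge-test cascade inside the loop, B classifies all 17 z-values up front into three label sets h1/h2/h3 by set arithmetic on the adjacency lists (hoisting the z-independent x-y test out of the loop entirely), then emits the lines in one pass by set membership.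
import Mathlib
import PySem

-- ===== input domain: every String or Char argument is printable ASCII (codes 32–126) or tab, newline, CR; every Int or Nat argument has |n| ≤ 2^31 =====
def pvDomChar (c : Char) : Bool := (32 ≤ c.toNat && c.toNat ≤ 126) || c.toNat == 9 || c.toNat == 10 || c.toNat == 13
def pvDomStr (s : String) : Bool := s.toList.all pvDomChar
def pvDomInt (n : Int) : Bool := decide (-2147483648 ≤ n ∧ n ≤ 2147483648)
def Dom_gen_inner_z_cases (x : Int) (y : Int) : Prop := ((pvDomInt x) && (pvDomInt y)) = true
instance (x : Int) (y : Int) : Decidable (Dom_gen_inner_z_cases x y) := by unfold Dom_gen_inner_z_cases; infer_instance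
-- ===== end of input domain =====

-- B classifies all 17 z-values up front into three label sets by set arithmetic on the
-- adjacency lists (the z-independent x-y test is hoisted out of the loop), then emits the
-- lines in one membership-driven pass, instead of A's per-z six-way cascade (alternative).

-- ===== PORT A =====
def pvEDGES : PySem.Dict Int (List Int) := PySem.Dict.ofList [
  (0, [9, 14, 15, 16]), (1, [7, 11, 13, 16]), (2, [8, 10, 12, 15]),
  (3, [6, 8, 13, 15, 16]), (4, [5, 7, 12, 14, 16]), (5, [4, 9, 10, 11, 13]),
  (6, [3, 10, 11, 12, 14]), (7, [1, 4, 9, 10, 15]), (8, [2, 3, 9, 11, 14]),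
  (9, [0, 5, 7, 8, 12]), (10, [2, 5, 6, 7, 16]), (11, [1, 5, 6, 8, 15]),
  (12, [2, 4, 6, 9, 13]), (13, [1, 3, 5, 12, 14]), (14, [0, 4, 6, 8, 13]),
  (15, [0, 2, 3, 7, 11]), (16, [0, 1, 3, 4, 10])]

-- EDGES[i] raises KeyError for i outside 0..16; Pre_ restricts x, y to 0..16, so getD [] is exact there.
def pv_is_edge (i j : Int) : Bool := (pvEDGES.getD i []).contains j

def pv_generate_case_proof (x y z : Int) : List String :=
  let lines : List String := []
  let xy_edge := pv_is_edge x y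
  let yz_edge := pv_is_edge y z
  let xz_edge := pv_is_edge x z
  if x == y then
    lines ++ ["    exact Adj17_not_" ++ PySem.Int.toStr x ++ "_" ++ PySem.Int.toStr y ++ " H1."]
  else if y == z then
    lines ++ ["    exact Adj17_not_" ++ PySem.Int.toStr y ++ "_" ++ PySem.Int.toStr z ++ " H2."]
  else if x == z then
    lines ++ ["    exact Adj17_not_" ++ PySem.Int.toStr x ++ "_" ++ PySem.Int.toStr z ++ " H3."]
  else if !xy_edge then
    lines ++ ["    exact Adj17_not_" ++ PySem.Int.toStr x ++ "_" ++ PySem.Int.toStr y ++ " H1."]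
  else if !yz_edge then
    lines ++ ["    exact Adj17_not_" ++ PySem.Int.toStr y ++ "_" ++ PySem.Int.toStr z ++ " H2."]
  else if !xz_edge then
    lines ++ ["    exact Adj17_not_" ++ PySem.Int.toStr x ++ "_" ++ PySem.Int.toStr z ++ " H3."]
  else
    []  -- raise ValueError("Triangle detected: …"): the graph is triangle-free, unreachable under Pre_

def gen_inner_z_cases (x : Int) (y : Int) : List String :=
  (PySem.List.pyRange 0 17 1).foldl (fun lines z =>
    ((lines ++ ["  + assume Hz: z = " ++ PySem.Int.toStr z ++ "."])
      ++ ["    rewrite Hz in H1 H2 H3."])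
      ++ pv_generate_case_proof x y z) []

-- ===== PORT B =====
-- Staged classification: h1/h2/h3 are the z-sets refuted by H1/H2/H3.
def pvB_labelSets (x y : Int) : PySem.Set Int × PySem.Set Int × PySem.Set Int :=
  let Z : PySem.Set Int := PySem.Set.ofList (PySem.List.pyRange 0 17 1)
  if x == y then
    (Z, PySem.Set.empty, PySem.Set.empty)
  else
    let nx : PySem.Set Int := PySem.Set.ofList (pvEDGES.getD x [])
    let ny : PySem.Set Int := PySem.Set.ofList (pvEDGES.getD y [])
    let rest := PySem.Set.diff Z (PySem.Set.ofList [x, y])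
    if !(nx.contains y) then
      (rest, PySem.Set.ofList [y], PySem.Set.ofList [x])
    else
      -- tri = rest & ny & nx is empty (the graph is triangle-free); Source B's raise is unreachable under Pre_
      (PySem.Set.empty,
       PySem.Set.union (PySem.Set.ofList [y]) (PySem.Set.diff rest ny),
       PySem.Set.union (PySem.Set.ofList [x]) (PySem.Set.diff (PySem.Set.inter rest ny) nx))

def gen_inner_z_cases_alt (x : Int) (y : Int) : List String :=
  let s := pvB_labelSets x y
  (PySem.List.pyRange 0 17 1).foldl (fun lines z =>
    let lines := lines ++ ["  + assume Hz: z = " ++ PySem.Int.toStr z ++ "."]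
    let lines := lines ++ ["    rewrite Hz in H1 H2 H3."]
    if s.1.contains z then
      lines ++ ["    exact Adj17_not_" ++ PySem.Int.toStr x ++ "_" ++ PySem.Int.toStr y ++ " H1."]
    else if s.2.1.contains z then
      lines ++ ["    exact Adj17_not_" ++ PySem.Int.toStr y ++ "_" ++ PySem.Int.toStr z ++ " H2."]
    else
      lines ++ ["    exact Adj17_not_" ++ PySem.Int.toStr x ++ "_" ++ PySem.Int.toStr z ++ " H3."]) []

-- ===== PRECONDITION & SPEC =====
-- A raises KeyError (EDGES[x] / EDGES[y]) for x or y outside 0..16; inside, the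
-- triangle-free graph means the ValueError branch never fires, so A always returns.
def Pre_gen_inner_z_cases (x : Int) (y : Int) : Prop := 0 ≤ x ∧ x ≤ 16 ∧ 0 ≤ y ∧ y ≤ 16
instance (x : Int) (y : Int) : Decidable (Pre_gen_inner_z_cases x y) := by unfold Pre_gen_inner_z_cases; infer_instance
def pvWitness_gen_inner_z_cases : Int × Int := (0, 1)

def Spec_gen_inner_z_cases (x : Int) (y : Int) (out : List String) : Prop := out = gen_inner_z_cases_alt x y
instance (x : Int) (y : Int) (out : List String) : Decidable (Spec_gen_inner_z_cases x y out) := by unfold Spec_gen_inner_z_cases; infer_instance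

-- ===== CLAIM =====
def Claim_equal_gen_inner_z_cases : Prop := ∀ (x : Int) (y : Int), Dom_gen_inner_z_cases x y → Pre_gen_inner_z_cases x y → Spec_gen_inner_z_cases x y (gen_inner_z_cases x y)

-- ===== LEMMAS AND PROOFS =====

-- The Graver-Yackel adjacency table is triangle-free: no neighbour z of a neighbour y of x
-- is itself a neighbour of x (a finite fact, checked by kernel evaluation).
theorem pv_tri_free : ∀ x ∈ PySem.List.pyRange 0 17 1, ∀ y ∈ pvEDGES.getD x [], ∀ z ∈ pvEDGES.getD y [],
    (pvEDGES.getD x []).contains z = false := by decide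

-- Per-z agreement: B's membership selection over the staged label sets picks exactly the
-- line A's six-way cascade produces, for x, y, z in 0..16.
theorem pv_sel_eq (x y z : Int) (hx : x ∈ PySem.List.pyRange 0 17 1)
    (_hy : y ∈ PySem.List.pyRange 0 17 1) (hz : z ∈ PySem.List.pyRange 0 17 1) :
    (if (pvB_labelSets x y).1.contains z then
      ["    exact Adj17_not_" ++ PySem.Int.toStr x ++ "_" ++ PySem.Int.toStr y ++ " H1."]
    else if (pvB_labelSets x y).2.1.contains z then
      ["    exact Adj17_not_" ++ PySem.Int.toStr y ++ "_" ++ PySem.Int.toStr z ++ " H2."]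
    else
      ["    exact Adj17_not_" ++ PySem.Int.toStr x ++ "_" ++ PySem.Int.toStr z ++ " H3."])
    = pv_generate_case_proof x y z := by
  unfold pvB_labelSets pv_generate_case_proof pv_is_edge
  by_cases hxy : x = y
  · simp [hxy, PySem.Set.contains_iff, PySem.Set.mem_ofList, hz]
  · by_cases hexy : y ∈ pvEDGES.getD x []
    · by_cases hyz : y = z
      · subst hyz
        simp [hxy, hexy, PySem.Set.contains_iff, PySem.Set.mem_union,
          PySem.Set.mem_ofList, PySem.Set.mem_diff]
      · by_cases hxz : x = z
        · subst hxz
          simp [hxy, hyz, hexy, Ne.symm hyz, PySem.Set.contains_iff, PySem.Set.mem_union,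
            PySem.Set.mem_ofList, PySem.Set.mem_diff, PySem.Set.mem_inter]
        · by_cases heyz : z ∈ pvEDGES.getD y []
          · have hexz : z ∉ pvEDGES.getD x [] := by
              have := pv_tri_free x hx y hexy z heyz
              simpa using this
            simp [hxy, hyz, hxz, hexy, heyz, hexz, Ne.symm hyz, Ne.symm hxz,
              PySem.Set.contains_iff, PySem.Set.mem_union, PySem.Set.mem_ofList,
              PySem.Set.mem_diff, PySem.Set.mem_inter]
          · simp [hxy, hyz, hxz, hexy, heyz, hz, Ne.symm hyz, Ne.symm hxz,
              PySem.Set.contains_iff, PySem.Set.mem_union, PySem.Set.mem_ofList,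
              PySem.Set.mem_diff]
    · by_cases hyz : y = z
      · subst hyz
        simp [hxy, hexy, PySem.Set.contains_iff, PySem.Set.mem_ofList, PySem.Set.mem_diff]
      · by_cases hxz : x = z
        · subst hxz
          simp [hxy, hyz, hexy, Ne.symm hyz, PySem.Set.contains_iff, PySem.Set.mem_ofList,
            PySem.Set.mem_diff]
        · simp [hxy, hyz, hxz, hexy, hz, Ne.symm hxz, Ne.symm hyz,
            PySem.Set.contains_iff, PySem.Set.mem_ofList, PySem.Set.mem_diff]

-- ===== VERDICT =====
theorem gen_inner_z_cases_spec : Claim_equal_gen_inner_z_cases := by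
  intro x y _ hpre
  obtain ⟨hx0, hx1, hy0, hy1⟩ := hpre
  have hx : x ∈ PySem.List.pyRange 0 17 1 := by rw [PySem.List.mem_pyRange_one]; omega
  have hy : y ∈ PySem.List.pyRange 0 17 1 := by rw [PySem.List.mem_pyRange_one]; omega
  unfold Spec_gen_inner_z_cases gen_inner_z_cases gen_inner_z_cases_alt
  simp only []
  apply PySem.List.foldl_congr_mem
  intro lines z hz
  rw [← pv_sel_eq x y z hx hy hz]
  split_ifs <;> simp
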